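-- pv_equiv track=rewrite | github.com/Kreijstal/circuijts | circuijt/ast_utils.py | _generate_implicit_nodes
-- ===== SOURCE A (Python) =====
-- def _generate_implicit_nodes(structural_path_elements, implicit_node_counter):
--     implicit_nodes_generated = set()
--
--     # Implicit node at the end if needed
--     last_el_in_structural_path = structural_path_elements[-1]
--     if last_el_in_structural_path.get("type") not in ["node"]:
--         implicit_node_counter += 1
--         implicit_nodes_generated.add(f"_implicit_node_{implicit_node_counter}")
--
--     # Implicit nodes between structural elements if neither is a node
--     for i in range(len(structural_path_elements) - 1):
--         el_current = structural_path_elements[i]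
--         el_next = structural_path_elements[i + 1]
--
--         if el_current.get("type") not in ["node"] and el_next.get("type") not in ["node"]:
--             implicit_node_counter += 1
--             implicit_nodes_generated.add(f"_implicit_node_{implicit_node_counter}")
--
--     return implicit_nodes_generated, implicit_node_counter
-- ===== SOURCE B (Python) =====
-- def _generate_implicit_nodes(structural_path_elements, implicit_node_counter):
--     # Run-length view: one scan keeps the length of the current maximal run of
--     # consecutive non-node elements; an interior run of length k needs k - 1
--     # implicit nodes between its members, and the run reaching the end of the
--     # path needs k (k - 1 between, plus one after the last element).
--     count = 0
--     run = 0
--     for el in structural_path_elements: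
--         if el.get("type") == "node":
--             if run:
--                 count += run - 1
--             run = 0
--         else:
--             run += 1
--     count += run
--     new_counter = implicit_node_counter + count
--     names = {f"_implicit_node_{j}" for j in range(implicit_node_counter + 1, new_counter + 1)}
--     return names, new_counter
-- ===== Notes on version B (the rewrite author's own statement) =====
-- stated objective: alternative
-- what changed: Replaces A's adjacent-pair scan plus separate end-of-path check by a run-length scan: one pass tracks the length of the current maximal run of consecutive non-node elements (an interior run of length k contributes k-1, the final run contributes k), and the names are then generated afterwards from one counter range instead of being added inside the scan.
import Mathlib
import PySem

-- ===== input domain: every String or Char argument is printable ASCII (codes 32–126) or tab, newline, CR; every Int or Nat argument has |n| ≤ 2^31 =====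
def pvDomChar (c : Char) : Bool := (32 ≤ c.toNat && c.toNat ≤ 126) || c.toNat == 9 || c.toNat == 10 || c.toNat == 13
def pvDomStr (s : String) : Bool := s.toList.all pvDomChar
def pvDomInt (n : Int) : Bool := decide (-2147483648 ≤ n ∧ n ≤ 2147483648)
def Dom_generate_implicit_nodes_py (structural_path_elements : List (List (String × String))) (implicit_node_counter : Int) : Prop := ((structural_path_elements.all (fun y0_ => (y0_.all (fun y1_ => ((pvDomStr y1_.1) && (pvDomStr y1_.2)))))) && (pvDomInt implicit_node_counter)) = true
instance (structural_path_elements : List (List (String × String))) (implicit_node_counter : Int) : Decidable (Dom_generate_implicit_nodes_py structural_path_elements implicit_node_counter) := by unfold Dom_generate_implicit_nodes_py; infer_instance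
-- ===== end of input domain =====

-- B replaces A's adjacent-pair scan (set and counter mutated together) by a run-length scan
-- that only counts (an interior run of k consecutive non-node elements gives k-1 nodes, the
-- final run gives k), followed by one range comprehension building the names.
-- Equivalence of the RETURN value is proved on nonempty input (A raises IndexError on []).

-- ===== PORT A =====
-- Literal transliteration of A: a set accumulated together with the counter,
-- first the end-of-path check, then a loop over i in range(len-1).
-- (xs[i] / xs[i+1] inside the loop are in range, so pyGetD is exact there.)
def generate_implicit_nodes_py (structural_path_elements : List (List (String × String))) (implicit_node_counter : Int) : List String × Int :=
  let s0 : PySem.Set String := PySem.Set.empty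
  match PySem.List.pyGet? structural_path_elements (-1) with
  | none => (s0, implicit_node_counter)  -- IndexError on empty input; excluded by Pre_
  | some last_el =>
    let sc :=
      if PySem.Dict.get? (PySem.Dict.mk last_el) "type" ∉ [(some "node" : Option String)] then
        (PySem.Set.add s0 ("_implicit_node_" ++ PySem.Int.toStr (implicit_node_counter + 1)),
         implicit_node_counter + 1)
      else (s0, implicit_node_counter)
    (PySem.List.pyRange 0 (PySem.List.len structural_path_elements - 1) 1).foldl
      (fun (acc : PySem.Set String × Int) i =>
        let el_current := PySem.List.pyGetD structural_path_elements i []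
        let el_next := PySem.List.pyGetD structural_path_elements (i + 1) []
        if PySem.Dict.get? (PySem.Dict.mk el_current) "type" ∉ [(some "node" : Option String)] ∧
           PySem.Dict.get? (PySem.Dict.mk el_next) "type" ∉ [(some "node" : Option String)] then
          (PySem.Set.add acc.1 ("_implicit_node_" ++ PySem.Int.toStr (acc.2 + 1)), acc.2 + 1)
        else acc) sc

-- ===== PORT B =====
-- Transliteration of Source B: one loop keeps (count, run) — run = length of the current
-- maximal run of consecutive non-node elements — then builds all names from the
-- counter range range(implicit_node_counter + 1, new_counter + 1).
def generate_implicit_nodes_py_alt (structural_path_elements : List (List (String × String))) (implicit_node_counter : Int) : List String × Int :=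
  let cr : Int × Int :=
    structural_path_elements.foldl
      (fun (acc : Int × Int) el =>
        if PySem.Dict.get? (PySem.Dict.mk el) "type" == some "node" then
          (if acc.2 != 0 then acc.1 + (acc.2 - 1) else acc.1, 0)
        else (acc.1, acc.2 + 1)) (0, 0)
  let count : Int := cr.1 + cr.2
  let new_counter : Int := implicit_node_counter + count
  let names : PySem.Set String :=
    PySem.Set.ofList ((PySem.List.pyRange (implicit_node_counter + 1) (new_counter + 1) 1).map
      (fun j => "_implicit_node_" ++ PySem.Int.toStr j))
  (names, new_counter)

-- ===== PRECONDITION & SPEC =====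
-- Pre_ excludes only the empty list, on which A raises IndexError.
def Pre_generate_implicit_nodes_py (structural_path_elements : List (List (String × String))) (implicit_node_counter : Int) : Prop :=
  structural_path_elements ≠ []
instance (structural_path_elements : List (List (String × String))) (implicit_node_counter : Int) : Decidable (Pre_generate_implicit_nodes_py structural_path_elements implicit_node_counter) := by unfold Pre_generate_implicit_nodes_py; infer_instance
def pvWitness_generate_implicit_nodes_py : (List (List (String × String))) × Int :=
  ([[("type", "wire")], [("type", "node")], [("type", "wire")], [("type", "wire")]], 3)
def Spec_generate_implicit_nodes_py (structural_path_elements : List (List (String × String))) (implicit_node_counter : Int) (out : List String × Int) : Prop := out = generate_implicit_nodes_py_alt structural_path_elements implicit_node_counter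
instance (structural_path_elements : List (List (String × String))) (implicit_node_counter : Int) (out : List String × Int) : Decidable (Spec_generate_implicit_nodes_py structural_path_elements implicit_node_counter out) := by unfold Spec_generate_implicit_nodes_py; infer_instance

-- ===== CLAIM (what is proved, stated in full; the proofs are below) =====
def Claim_equal_generate_implicit_nodes_py : Prop := ∀ (structural_path_elements : List (List (String × String))) (implicit_node_counter : Int), Dom_generate_implicit_nodes_py structural_path_elements implicit_node_counter → Pre_generate_implicit_nodes_py structural_path_elements implicit_node_counter → Spec_generate_implicit_nodes_py structural_path_elements implicit_node_counter (generate_implicit_nodes_py structural_path_elements implicit_node_counter)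

-- ===== LEMMAS AND PROOFS =====

-- the generated name for counter value j
def giName (j : Int) : String := "_implicit_node_" ++ PySem.Int.toStr j

-- the k names handed out after counter value c
def giSeg (c : Int) (k : Nat) : List String :=
  (PySem.List.pyRange (c + 1) (c + 1 + k) 1).map giName

-- is this element a node? (the Bool B's loop branches on)
def giIsNode (el : List (String × String)) : Bool :=
  PySem.Dict.get? (PySem.Dict.mk el) "type" == some "node"

-- one step of B's (count, run) loop, on the Bool mask
def giStep (acc : Int × Int) (b : Bool) : Int × Int :=
  if b then (if acc.2 != 0 then acc.1 + (acc.2 - 1) else acc.1, 0) else (acc.1, acc.2 + 1)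

-- number of implicit nodes A generates on the Bool mask: adjacent non-node pairs + end bonus
def giPairs (bs : List Bool) : Nat :=
  (bs.zip bs.tail).countP (fun p => !p.1 && !p.2)

def giS (bs : List Bool) : Nat :=
  giPairs bs + (if bs.getLast? = some false then 1 else 0)

theorem gi_idx_to_zip {β : Type} (g : β → List (String × String) → List (String × String) → β) :
    ∀ (xs : List (List (String × String))) (acc : β),
      (PySem.List.pyRange 0 (PySem.List.len xs - 1) 1).foldl
        (fun b i => g b (PySem.List.pyGetD xs i []) (PySem.List.pyGetD xs (i + 1) [])) acc
      = (xs.zip xs.tail).foldl (fun b p => g b p.1 p.2) acc := by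
  intro xs
  induction xs with
  | nil => intro acc; simp [PySem.List.pyRange_one_eq_nil (by norm_num : (-1:Int) ≤ 0)]
  | cons x t ih =>
    intro acc
    cases t with
    | nil => simp
    | cons y u =>
      have hlen : PySem.List.len (x :: y :: u) - 1 = ((u.length + 1 : Nat) : Int) := by
        simp
      have hpos : (0:Int) < ((u.length + 1 : Nat) : Int) := by positivity
      rw [hlen, PySem.List.pyRange_one_cons hpos]
      simp only [List.foldl_cons, zero_add]
      have h0 : PySem.List.pyGetD (x :: y :: u) 0 [] = x := PySem.List.pyGetD_zero_cons _ _ _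
      have h1 : PySem.List.pyGetD (x :: y :: u) 1 [] = y := by
        have : (1:Int) = ((1:Nat):Int) := by norm_num
        rw [this, PySem.List.pyGetD_natCast]; rfl
      rw [h0, h1]
      have hshift : (PySem.List.pyRange 1 ((u.length + 1 : Nat) : Int) 1).foldl
          (fun b i => g b (PySem.List.pyGetD (x :: y :: u) i []) (PySem.List.pyGetD (x :: y :: u) (i + 1) [])) (g acc x y)
          = (PySem.List.pyRange 0 (PySem.List.len (y :: u) - 1) 1).foldl
          (fun b i => g b (PySem.List.pyGetD (y :: u) i []) (PySem.List.pyGetD (y :: u) (i + 1) [])) (g acc x y) := by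
        have hl : PySem.List.len (y :: u) - 1 = ((u.length : Nat) : Int) := by simp
        rw [hl, PySem.List.pyRange_one, PySem.List.pyRange_one]
        have h1 : ((((u.length + 1 : Nat) : Int) - 1).toNat) = u.length := by omega
        have h2 : ((((u.length : Nat) : Int) - 0).toNat) = u.length := by omega
        rw [h1, h2, List.foldl_map, List.foldl_map]
        apply PySem.List.foldl_congr_mem
        intro b j hj
        simp only [List.mem_range] at hj
        have e1 : (1 : Int) + (j : Int) = ((j+1 : Nat) : Int) := by push_cast; ring
        have e4 : (0 : Int) + (j : Int) + 1 = ((j+1 : Nat) : Int) := by push_cast; ring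
        have e3 : (0 : Int) + (j : Int) = ((j : Nat) : Int) := by ring
        have f2 : ((j+1 : Nat) : Int) + 1 = ((j+2 : Nat) : Int) := by push_cast; ring
        rw [e1, f2, e4, e3, PySem.List.pyGetD_natCast, PySem.List.pyGetD_natCast,
            PySem.List.pyGetD_natCast, PySem.List.pyGetD_natCast]
        simp [List.getD]
      rw [hshift, ih (g acc x y)]
      simp

theorem gi_fold_char (pred : List (String × String) × List (String × String) → Prop) [DecidablePred pred] :
    ∀ (l : List (List (String × String) × List (String × String))) (s : PySem.Set String) (c : Int),
      l.foldl (fun (acc : PySem.Set String × Int) p =>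
          if pred p then (PySem.Set.add acc.1 (giName (acc.2 + 1)), acc.2 + 1) else acc) (s, c)
      = ((giSeg c (l.countP (fun p => decide (pred p)))).foldl PySem.Set.add s,
         c + (l.countP (fun p => decide (pred p)) : Int)) := by
  intro l
  induction l with
  | nil =>
    intro s c
    simp [giSeg]
  | cons p t ih =>
    intro s c
    by_cases hp : pred p
    · simp only [List.foldl_cons, if_pos hp, ih, List.countP_cons, decide_eq_true hp]
      simp only [if_true]
      rw [Prod.mk.injEq]
      constructor
      case _ =>
        have hseg : giSeg c (t.countP (fun p => decide (pred p)) + 1)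
            = giName (c + 1) :: giSeg (c + 1) (t.countP (fun p => decide (pred p))) := by
          unfold giSeg
          have hb : c + 1 + ((t.countP (fun p => decide (pred p)) + 1 : Nat) : Int)
              = c + 1 + 1 + (t.countP (fun p => decide (pred p)) : Int) := by push_cast; ring
          rw [hb, PySem.List.pyRange_one_cons (by omega)]
          simp only [List.map_cons]
        rw [hseg]
        rfl
      case _ => push_cast; omega
    · simp only [List.foldl_cons, if_neg hp, ih, List.countP_cons, decide_eq_false hp]
      simp

theorem giS_nil : giS [] = 0 := by simp [giS, giPairs]

theorem giS_singleton (b : Bool) : giS [b] = if b = false then 1 else 0 := by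
  cases b <;> simp [giS, giPairs]

theorem giS_cons_cons (a b : Bool) (u : List Bool) :
    giS (a :: b :: u) = (if a = false ∧ b = false then 1 else 0) + giS (b :: u) := by
  unfold giS giPairs
  simp only [List.zip_cons_cons, List.tail_cons, List.countP_cons, List.getLast?_cons_cons]
  cases a <;> cases b <;> simp <;> omega

theorem giS_rep : ∀ n : Nat, giS (List.replicate n false) = n := by
  intro n
  induction n with
  | zero => simp [giS_nil]
  | succ m ih =>
    cases m with
    | zero => simp [giS_singleton]
    | succ l =>
      have hcons : List.replicate (l + 2) false = false :: false :: List.replicate l false := by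
        simp [List.replicate_succ]
      have hcons' : List.replicate (l + 1) false = false :: List.replicate l false := by
        simp [List.replicate_succ]
      rw [hcons, giS_cons_cons, ← hcons', ih]
      simp only [and_self, if_pos trivial]
      omega

theorem giS_rep_true : ∀ (n : Nat) (t : List Bool),
    giS (List.replicate n false ++ true :: t) = (n - 1) + giS t := by
  intro n
  induction n with
  | zero =>
    intro t
    cases t with
    | nil => simp [giS_singleton, giS_nil]
    | cons h u => rw [List.replicate_zero, List.nil_append, giS_cons_cons]; simp
  | succ m ih =>
    intro t
    have hcons : List.replicate (m + 1) false ++ true :: t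
        = false :: (List.replicate m false ++ true :: t) := by
      simp [List.replicate_succ]
    rw [hcons]
    cases m with
    | zero =>
      rw [List.replicate_zero, List.nil_append, giS_cons_cons]
      have := ih t
      rw [List.replicate_zero, List.nil_append] at this
      rw [this]
      simp
    | succ l =>
      have hcons2 : List.replicate (l + 1) false ++ true :: t
          = false :: (List.replicate l false ++ true :: t) := by
        simp [List.replicate_succ]
      rw [hcons2, giS_cons_cons, ← hcons2, ih t]
      have hc : (false = false ∧ false = false) := ⟨rfl, rfl⟩
      rw [if_pos hc]
      omega

theorem gi_run_fold : ∀ (bs : List Bool) (cnt r : Int), 0 ≤ r →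
    ((bs.foldl giStep (cnt, r)).1 + (bs.foldl giStep (cnt, r)).2)
      = cnt + (giS (List.replicate r.toNat false ++ bs) : Int) := by
  intro bs
  induction bs with
  | nil =>
    intro cnt r hr
    simp only [List.foldl_nil, List.append_nil]
    rw [giS_rep]
    omega
  | cons b t ih =>
    intro cnt r hr
    cases b with
    | true =>
      have hstep : giStep (cnt, r) true
          = ((if r != 0 then cnt + (r - 1) else cnt), 0) := by rfl
      rw [List.foldl_cons, hstep, ih _ 0 le_rfl]
      have hS : giS (List.replicate r.toNat false ++ true :: t)
          = (r.toNat - 1) + giS t := giS_rep_true r.toNat t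
      rw [hS]
      simp only [Int.toNat_zero, List.replicate_zero, List.nil_append]
      by_cases h0 : r = 0
      · subst h0; simp
      · have : (r != 0) = true := by simpa using h0
        rw [this]
        simp only [if_true]
        push_cast
        omega
    | false =>
      have hstep : giStep (cnt, r) false = (cnt, r + 1) := by rfl
      rw [List.foldl_cons, hstep, ih _ (r + 1) (by omega)]
      have hrep : List.replicate (r + 1).toNat false ++ t
          = List.replicate r.toNat false ++ false :: t := by
        have : (r + 1).toNat = r.toNat + 1 := by omega
        rw [this, List.replicate_succ']
        simp
      rw [hrep]

theorem gi_main (xs : List (List (String × String))) (c : Int) (h : xs ≠ []) :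
    generate_implicit_nodes_py xs c = generate_implicit_nodes_py_alt xs c := by
  obtain ⟨last, hL⟩ : ∃ l, xs.getLast? = some l := by
    cases hx : xs.getLast? with
    | none => exact absurd (List.getLast?_eq_none_iff.mp hx) h
    | some l => exact ⟨l, rfl⟩
  have hget : PySem.List.pyGet? xs (-1) = some last := by
    rw [PySem.List.pyGet?_neg_one, hL]
  have hgi : ∀ j : Int, "_implicit_node_" ++ PySem.Int.toStr j = giName j := fun _ => rfl
  have hdec : ∀ d, decide (PySem.Dict.get? (PySem.Dict.mk d) "type" ∉ [(some "node" : Option String)])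
      = ! giIsNode d := by
    intro d
    unfold giIsNode
    cases hcase : PySem.Dict.get? (PySem.Dict.mk d) "type" with
    | none => simp
    | some v => by_cases hv : v = "node" <;> simp [hv]
  simp only [generate_implicit_nodes_py, generate_implicit_nodes_py_alt, hget]
  -- A's loop as a fold over adjacent pairs
  rw [gi_idx_to_zip (fun (b : PySem.Set String × Int) cur nxt =>
    if PySem.Dict.get? (PySem.Dict.mk cur) "type" ∉ [(some "node" : Option String)] ∧
       PySem.Dict.get? (PySem.Dict.mk nxt) "type" ∉ [(some "node" : Option String)] then
      (PySem.Set.add b.1 ("_implicit_node_" ++ PySem.Int.toStr (b.2 + 1)), b.2 + 1)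
    else b) xs]
  simp only [hgi]
  -- the pair count on the dict lists, and on the Bool mask
  set k : Nat := (xs.zip xs.tail).countP
      (fun p => decide (PySem.Dict.get? (PySem.Dict.mk p.1) "type" ∉ [(some "node" : Option String)] ∧
                        PySem.Dict.get? (PySem.Dict.mk p.2) "type" ∉ [(some "node" : Option String)])) with hk
  have hpairs : giPairs (xs.map giIsNode) = k := by
    unfold giPairs
    have ht : (xs.map giIsNode).tail = xs.tail.map giIsNode := by
      cases xs <;> simp
    rw [hk, ht, List.zip_map, List.countP_map]
    apply List.countP_congr
    intro p _
    simp only [Function.comp, Prod.map, Bool.decide_and, hdec]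
  -- B's loop is giStep over the mask
  have hfoldB : xs.foldl
      (fun (acc : Int × Int) el =>
        if PySem.Dict.get? (PySem.Dict.mk el) "type" == some "node" then
          (if acc.2 != 0 then acc.1 + (acc.2 - 1) else acc.1, 0)
        else (acc.1, acc.2 + 1)) ((0 : Int), (0 : Int))
      = (xs.map giIsNode).foldl giStep (0, 0) := by
    rw [List.foldl_map]
    rfl
  have hrun := gi_run_fold (xs.map giIsNode) 0 0 le_rfl
  simp only [Int.toNat_zero, List.replicate_zero, List.nil_append, zero_add] at hrun
  -- the last-element bonus on the mask
  have hlastmap : (xs.map giIsNode).getLast? = some (giIsNode last) := by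
    rw [List.getLast?_map, hL]; rfl
  have hS : giS (xs.map giIsNode)
      = k + (if giIsNode last = false then 1 else 0) := by
    unfold giS
    rw [hpairs, hlastmap]
    simp only [Option.some.injEq]
  rw [hfoldB]
  by_cases hlast : PySem.Dict.get? (PySem.Dict.mk last) "type" ∉ [(some "node" : Option String)]
  · have hb : giIsNode last = false := by
      have := hdec last
      rw [decide_eq_true hlast] at this
      simpa using this.symm
    rw [if_pos hlast]
    rw [gi_fold_char (fun p => PySem.Dict.get? (PySem.Dict.mk p.1) "type" ∉ [(some "node" : Option String)] ∧
        PySem.Dict.get? (PySem.Dict.mk p.2) "type" ∉ [(some "node" : Option String)]) (xs.zip xs.tail)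
        (PySem.Set.add PySem.Set.empty (giName (c + 1))) (c + 1)]
    have hcnt : ((xs.map giIsNode).foldl giStep (0, 0)).1 + ((xs.map giIsNode).foldl giStep (0, 0)).2
        = ((k + 1 : Nat) : Int) := by
      rw [hrun, hS, hb]
      norm_num
    rw [Prod.mk.injEq]
    constructor
    · have hrange : PySem.List.pyRange (c + 1)
          (c + (((xs.map giIsNode).foldl giStep (0, 0)).1 + ((xs.map giIsNode).foldl giStep (0, 0)).2) + 1) 1
          = PySem.List.pyRange (c + 1) (c + 1 + ((k + 1 : Nat) : Int)) 1 := by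
        rw [hcnt]; congr 1; push_cast; ring
      have hseg : (PySem.List.pyRange (c + 1) (c + 1 + ((k + 1 : Nat) : Int)) 1).map giName
          = giName (c + 1) :: giSeg (c + 1) k := by
        rw [PySem.List.pyRange_one_cons (by push_cast; omega)]
        unfold giSeg
        simp only [List.map_cons]
        congr 2
        push_cast
        ring
      rw [hrange, hseg, PySem.Set.ofList_eq_foldl]
      simp only [List.foldl_cons]
      rfl
    · rw [hcnt]
      push_cast
      ring
  · have hb : giIsNode last = true := by
      have := hdec last
      rw [decide_eq_false hlast] at this
      simpa using this.symm
    rw [if_neg hlast]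
    rw [gi_fold_char (fun p => PySem.Dict.get? (PySem.Dict.mk p.1) "type" ∉ [(some "node" : Option String)] ∧
        PySem.Dict.get? (PySem.Dict.mk p.2) "type" ∉ [(some "node" : Option String)]) (xs.zip xs.tail)
        PySem.Set.empty c]
    have hcnt : ((xs.map giIsNode).foldl giStep (0, 0)).1 + ((xs.map giIsNode).foldl giStep (0, 0)).2
        = ((k : Nat) : Int) := by
      rw [hrun, hS, hb]
      simp
    rw [Prod.mk.injEq]
    constructor
    · have hrange : PySem.List.pyRange (c + 1)
          (c + (((xs.map giIsNode).foldl giStep (0, 0)).1 + ((xs.map giIsNode).foldl giStep (0, 0)).2) + 1) 1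
          = PySem.List.pyRange (c + 1) (c + 1 + ((k : Nat) : Int)) 1 := by
        rw [hcnt]; congr 1; push_cast; ring
      rw [hrange, PySem.Set.ofList_eq_foldl]
      rfl
    · rw [hcnt]

-- ===== VERDICT (by name: the statement is the Claim_ definition above) =====
theorem generate_implicit_nodes_py_spec : Claim_equal_generate_implicit_nodes_py := by
  intro xs c _ hpre
  unfold Spec_generate_implicit_nodes_py
  exact gi_main xs c hpre
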